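-- pv_equiv track=rewrite | github.com/sfilipov/aoc2023 | day13.py | find_rows_symmetry
-- ===== SOURCE A (Python) =====
-- def find_rows_symmetry(rows: list[str], known_sym: int | None = None) -> int:
--     for axis in range(1, len(rows)):
--         to_check = min(axis, len(rows) - axis)
--         is_symmetric = True
--         for i in range(to_check):
--             if is_symmetric and rows[axis - i - 1] != rows[axis + i]:
--                 is_symmetric = False
--         if is_symmetric and axis != known_sym:
--             return axis
--     return -1
-- ===== SOURCE B (Python) =====
-- def find_rows_symmetry(rows: list[str], known_sym: int | None = None) -> int:
--     n = len(rows)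
--     # pass 1: every mismatching pair (p, q) with odd p+q rules out the axis (p+q+1)//2
--     bad = set()
--     for p in range(n):
--         for q in range(p + 1, n, 2):
--             if rows[p] != rows[q]:
--                 bad.add(p + q)
--     # pass 2: first axis whose diagonal 2*axis-1 carries no mismatch
--     for axis in range(1, n):
--         if 2 * axis - 1 not in bad and axis != known_sym:
--             return axis
--     return -1
-- ===== Notes on version B (the rewrite author's own statement) =====
-- stated objective: alternative
-- what changed: B inverts the loop structure: instead of testing each axis with an inner mirror loop, one pass over all odd-sum row pairs records mismatching pair sums in a set of bad diagonals, and a second flat scan returns the first axis whose diagonal 2*axis-1 is not bad.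
import Mathlib
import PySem

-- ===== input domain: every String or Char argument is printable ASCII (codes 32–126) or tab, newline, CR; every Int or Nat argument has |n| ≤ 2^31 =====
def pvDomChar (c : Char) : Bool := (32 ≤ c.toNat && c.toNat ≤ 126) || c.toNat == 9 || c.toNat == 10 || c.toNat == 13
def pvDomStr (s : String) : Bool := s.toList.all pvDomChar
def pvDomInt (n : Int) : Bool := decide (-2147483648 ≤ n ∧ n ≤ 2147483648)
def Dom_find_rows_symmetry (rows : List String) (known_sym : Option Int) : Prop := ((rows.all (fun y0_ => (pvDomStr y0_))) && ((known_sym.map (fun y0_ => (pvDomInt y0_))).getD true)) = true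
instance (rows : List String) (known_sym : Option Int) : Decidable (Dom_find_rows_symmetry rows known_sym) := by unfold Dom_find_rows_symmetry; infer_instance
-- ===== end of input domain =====

-- B inverts A's loop structure: one pass over all odd-sum row pairs records mismatching
-- pair sums in a set of bad diagonals, then a flat scan returns the first axis whose
-- diagonal 2*axis-1 is unmarked; same return value by a different decomposition.

-- ===== PORT A =====
-- inner loop body of A: 'if is_symmetric and rows[axis-i-1] != rows[axis+i]: is_symmetric = False'
-- (indices are always in range for 1 ≤ axis < len rows and 0 ≤ i < min axis (len - axis),
--  so pyGetD with default "" is exact here)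
def pvInnerA (rows : List String) (axis : Int) (b : Bool) (i : Int) : Bool :=
  if b && !(PySem.List.pyGetD rows (axis - i - 1) "" == PySem.List.pyGetD rows (axis + i) "") then
    false
  else b

def pvLoopA (rows : List String) (known_sym : Option Int) (n : Int) : List Int → Int
  | [] => -1
  | axis :: rest =>
    let to_check := min axis (n - axis)
    let is_symmetric := (PySem.List.pyRange 0 to_check 1).foldl (pvInnerA rows axis) true
    if is_symmetric && (some axis != known_sym) then axis else pvLoopA rows known_sym n rest

def find_rows_symmetry (rows : List String) (known_sym : Option Int) : Int :=
  pvLoopA rows known_sym (rows.length : Int) (PySem.List.pyRange 1 (rows.length : Int) 1)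

-- ===== PORT B =====
-- body of B's inner pair loop: 'if rows[p] != rows[q]: bad.add(p + q)'
-- (p, q are always in range, so pyGetD with default "" is exact here)
def pvMarkQ (rows : List String) (p : Int) (s : PySem.Set Int) (q : Int) : PySem.Set Int :=
  if !(PySem.List.pyGetD rows p "" == PySem.List.pyGetD rows q "") then PySem.Set.add s (p + q)
  else s

-- pass 1 of B: the set of bad diagonals
def pvBad (rows : List String) (n : Int) : PySem.Set Int :=
  (PySem.List.pyRange 0 n 1).foldl
    (fun s p => (PySem.List.pyRange (p + 1) n 2).foldl (pvMarkQ rows p) s)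
    PySem.Set.empty

-- pass 2 of B: first axis whose diagonal is not bad
def pvLoopB (known_sym : Option Int) (bad : PySem.Set Int) : List Int → Int
  | [] => -1
  | a :: rest =>
    if !(PySem.Set.contains bad (2 * a - 1)) && (some a != known_sym) then a
    else pvLoopB known_sym bad rest

def find_rows_symmetry_alt (rows : List String) (known_sym : Option Int) : Int :=
  pvLoopB known_sym (pvBad rows (rows.length : Int)) (PySem.List.pyRange 1 (rows.length : Int) 1)

-- ===== PRECONDITION & SPEC =====
def Spec_find_rows_symmetry (rows : List String) (known_sym : Option Int) (out : Int) : Prop := out = find_rows_symmetry_alt rows known_sym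
instance (rows : List String) (known_sym : Option Int) (out : Int) : Decidable (Spec_find_rows_symmetry rows known_sym out) := by unfold Spec_find_rows_symmetry; infer_instance

-- ===== CLAIM =====
def Claim_equal_find_rows_symmetry : Prop := ∀ (rows : List String) (known_sym : Option Int), Dom_find_rows_symmetry rows known_sym → Spec_find_rows_symmetry rows known_sym (find_rows_symmetry rows known_sym)

-- ===== LEMMAS AND PROOFS =====

-- the per-index equality test of A's inner loop
def pvEqA (rows : List String) (axis i : Int) : Bool :=
  PySem.List.pyGetD rows (axis - i - 1) "" == PySem.List.pyGetD rows (axis + i) ""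

theorem pvInnerA_eq (rows : List String) (axis : Int) (b : Bool) (i : Int) :
    pvInnerA rows axis b i = (b && pvEqA rows axis i) := by
  unfold pvInnerA pvEqA
  cases b <;> cases h : (PySem.List.pyGetD rows (axis - i - 1) "" == PySem.List.pyGetD rows (axis + i) "") <;>
    simp_all

theorem foldl_innerA (rows : List String) (axis : Int) (l : List Int) (b : Bool) :
    l.foldl (pvInnerA rows axis) b = (b && l.all (pvEqA rows axis)) := by
  induction l generalizing b with
  | nil => simp
  | cons x xs ih => simp [List.foldl_cons, pvInnerA_eq, ih, Bool.and_assoc]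

-- membership after B's inner pair loop
theorem mem_foldl_markQ (rows : List String) (p : Int) (l : List Int) (s : PySem.Set Int)
    (x : Int) :
    x ∈ l.foldl (pvMarkQ rows p) s
      ↔ x ∈ s ∨ ∃ q ∈ l, ¬(PySem.List.pyGetD rows p "" = PySem.List.pyGetD rows q "") ∧ x = p + q := by
  induction l generalizing s with
  | nil => simp
  | cons q qs ih =>
    rw [List.foldl_cons, ih]
    unfold pvMarkQ
    by_cases h : (PySem.List.pyGetD rows p "" == PySem.List.pyGetD rows q "") = true
    · simp only [h, Bool.not_true, Bool.false_eq_true, if_false]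
      have h' : PySem.List.pyGetD rows p "" = PySem.List.pyGetD rows q "" := by
        simpa using h
      constructor
      · rintro (hs | ⟨q', hq', hne, hx⟩)
        · exact Or.inl hs
        · exact Or.inr ⟨q', List.mem_cons_of_mem _ hq', hne, hx⟩
      · rintro (hs | ⟨q', hq', hne, hx⟩)
        · exact Or.inl hs
        · rcases List.mem_cons.mp hq' with rfl | hq'
          · exact absurd h' hne
          · exact Or.inr ⟨q', hq', hne, hx⟩
    · have h' : ¬(PySem.List.pyGetD rows p "" = PySem.List.pyGetD rows q "") := by
        simpa using h
      simp only [Bool.not_eq_true] at h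
      simp only [h, Bool.not_false, if_true, PySem.Set.mem_add]
      constructor
      · rintro ((hs | hx) | ⟨q', hq', hne, hx⟩)
        · exact Or.inl hs
        · exact Or.inr ⟨q, List.mem_cons_self .., h', hx⟩
        · exact Or.inr ⟨q', List.mem_cons_of_mem _ hq', hne, hx⟩
      · rintro (hs | ⟨q', hq', hne, hx⟩)
        · exact Or.inl (Or.inl hs)
        · rcases List.mem_cons.mp hq' with rfl | hq'
          · exact Or.inl (Or.inr hx)
          · exact Or.inr ⟨q', hq', hne, hx⟩

-- membership after B's outer pair loop
theorem mem_foldl_outer (rows : List String) (n : Int) (l : List Int) (s : PySem.Set Int)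
    (x : Int) :
    x ∈ l.foldl (fun s p => (PySem.List.pyRange (p + 1) n 2).foldl (pvMarkQ rows p) s) s
      ↔ x ∈ s ∨ ∃ p ∈ l, ∃ q ∈ PySem.List.pyRange (p + 1) n 2,
          ¬(PySem.List.pyGetD rows p "" = PySem.List.pyGetD rows q "") ∧ x = p + q := by
  induction l generalizing s with
  | nil => simp
  | cons p ps ih =>
    rw [List.foldl_cons, ih, mem_foldl_markQ]
    constructor
    · rintro ((hs | h) | ⟨p', hp', h⟩)
      · exact Or.inl hs
      · exact Or.inr ⟨p, List.mem_cons_self .., h⟩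
      · exact Or.inr ⟨p', List.mem_cons_of_mem _ hp', h⟩
    · rintro (hs | ⟨p', hp', h⟩)
      · exact Or.inl (Or.inl hs)
      · rcases List.mem_cons.mp hp' with rfl | hp'
        · exact Or.inl (Or.inr h)
        · exact Or.inr ⟨p', hp', h⟩

-- membership in B's set of bad diagonals
theorem mem_pvBad (rows : List String) (n x : Int) :
    x ∈ pvBad rows n
      ↔ ∃ p ∈ PySem.List.pyRange 0 n 1, ∃ q ∈ PySem.List.pyRange (p + 1) n 2,
          ¬(PySem.List.pyGetD rows p "" = PySem.List.pyGetD rows q "") ∧ x = p + q := by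
  unfold pvBad
  rw [mem_foldl_outer]
  simp [PySem.Set.empty]

-- A's symmetry flag for axis a equals the complement of B's diagonal mark
theorem flag_eq_not_bad (rows : List String) (a : Int)
    (h1 : 1 ≤ a) (h2 : a + 1 ≤ (rows.length : Int)) :
    (PySem.List.pyRange 0 (min a ((rows.length : Int) - a)) 1).foldl (pvInnerA rows a) true
      = !(PySem.Set.contains (pvBad rows (rows.length : Int)) (2 * a - 1)) := by
  set n : Int := (rows.length : Int) with hn
  rw [foldl_innerA, Bool.true_and]
  by_cases hmem : (2 * a - 1) ∈ pvBad rows n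
  · -- some pair mismatches: the flag is false
    have hc : PySem.Set.contains (pvBad rows n) (2 * a - 1) = true :=
      (PySem.Set.contains_iff _ _).mpr hmem
    rw [hc, Bool.not_true, List.all_eq_false]
    rw [mem_pvBad] at hmem
    obtain ⟨p, hp, q, hq, hne, hsum⟩ := hmem
    rw [PySem.List.mem_pyRange_one] at hp
    rw [PySem.List.mem_pyRange_iff_of_pos (by norm_num)] at hq
    refine ⟨a - 1 - p, ?_, ?_⟩
    · rw [PySem.List.mem_pyRange_one]; omega
    · unfold pvEqA
      have hpe : a - (a - 1 - p) - 1 = p := by omega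
      have hqe : a + (a - 1 - p) = q := by omega
      rw [hpe, hqe]
      simpa using hne
  · -- no pair mismatches: the flag is true
    have hc : PySem.Set.contains (pvBad rows n) (2 * a - 1) = false := by
      cases h : PySem.Set.contains (pvBad rows n) (2 * a - 1) with
      | false => rfl
      | true => exact absurd ((PySem.Set.contains_iff _ _).mp h) hmem
    rw [hc, Bool.not_false]
    rw [List.all_eq_true]
    intro i hi
    rw [PySem.List.mem_pyRange_one] at hi
    by_contra hne
    apply hmem
    rw [mem_pvBad]
    refine ⟨a - i - 1, ?_, a + i, ?_, ?_, by omega⟩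
    · rw [PySem.List.mem_pyRange_one]; omega
    · rw [PySem.List.mem_pyRange_iff_of_pos (by norm_num)]
      refine ⟨by omega, by omega, ⟨i, by omega⟩⟩
    · intro heq
      exact hne (by unfold pvEqA; simpa using heq)

-- the two scans agree on any list of axes inside [1, n)
theorem loopA_eq_loopB (rows : List String) (known_sym : Option Int) (l : List Int)
    (hmem : ∀ a ∈ l, 1 ≤ a ∧ a + 1 ≤ (rows.length : Int)) :
    pvLoopA rows known_sym (rows.length : Int) l
      = pvLoopB known_sym (pvBad rows (rows.length : Int)) l := by
  induction l with
  | nil => rfl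
  | cons a rest ih =>
    obtain ⟨h1, h2⟩ := hmem a (List.mem_cons_self ..)
    rw [pvLoopA, pvLoopB]
    simp only [flag_eq_not_bad rows a h1 h2]
    rw [ih (fun a' ha' => hmem a' (List.mem_cons_of_mem _ ha'))]

-- ===== VERDICT =====
theorem find_rows_symmetry_spec : Claim_equal_find_rows_symmetry := by
  intro rows known_sym _
  unfold Spec_find_rows_symmetry find_rows_symmetry find_rows_symmetry_alt
  exact loopA_eq_loopB rows known_sym _ (fun a ha => by
    rw [PySem.List.mem_pyRange_one] at ha; omega)
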